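-- pv_equiv track=rewrite | github.com/stuxf/aoc | 2024/07/07.py | all_valid
-- ===== SOURCE A (Python) =====
-- def all_valid(arr_nums, res):
--     if len(arr_nums) == 1:
--         return [arr_nums[0]]
--     return [
--         s
--         for num in all_valid(arr_nums[1:], res)
--         for s in (arr_nums[0] + num, arr_nums[0] * num)
--         if s <= res
--     ]
-- ===== SOURCE B (Python) =====
-- def all_valid(arr_nums, res):
--     *init, last = arr_nums
--     values = [last]
--     for x in reversed(init):
--         values = [s for num in values for s in (x + num, x * num) if s <= res]
--     return values
-- ===== Notes on version B (the rewrite author's own statement) =====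
-- stated objective: alternative
-- what changed: Replaced head recursion with an iterative right-to-left fold: seed the list with the last element and rebuild it once per earlier element, no recursion.
import Mathlib
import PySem

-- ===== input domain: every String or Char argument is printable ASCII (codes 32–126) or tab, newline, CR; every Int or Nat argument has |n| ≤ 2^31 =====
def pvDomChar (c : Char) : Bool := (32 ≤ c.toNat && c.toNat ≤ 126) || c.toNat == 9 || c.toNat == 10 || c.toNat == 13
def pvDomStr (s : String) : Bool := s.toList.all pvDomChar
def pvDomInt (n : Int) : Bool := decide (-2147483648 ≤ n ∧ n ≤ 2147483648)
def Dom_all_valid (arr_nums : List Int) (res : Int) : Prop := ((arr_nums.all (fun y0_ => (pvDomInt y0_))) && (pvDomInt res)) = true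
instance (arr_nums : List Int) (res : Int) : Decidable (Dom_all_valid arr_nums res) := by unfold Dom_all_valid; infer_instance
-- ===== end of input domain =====

-- B replaces A's head recursion by an iterative right-to-left fold (seed = last element); alternative decomposition, same values.


-- ===== PORT A =====
-- literal transliteration of A: recursion on the tail, comprehension = flatMap + filter.
-- (on [] Python A recurses forever; that input is excluded by Pre_ below)
def all_valid (arr_nums : List Int) (res : Int) : List Int :=
  match arr_nums with
  | [] => []
  | [x] => [x]
  | x :: rest =>
      (all_valid rest res).flatMap (fun num => ([x + num, x * num]).filter (fun s => s ≤ res))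

-- ===== PORT B =====
-- one rebuilding step of B's loop body: values = [s for num in values for s in (x+num, x*num) if s <= res]
def altStep (res : Int) (values : List Int) (x : Int) : List Int :=
  values.flatMap (fun num => ([x + num, x * num]).filter (fun s => s ≤ res))

-- B: split off the last element (via reverse), seed with it, fold over the earlier elements right-to-left
def all_valid_alt (arr_nums : List Int) (res : Int) : List Int :=
  match arr_nums.reverse with
  | [] => []
  | last :: revinit => revinit.foldl (altStep res) [last]

-- ===== PRECONDITION & SPEC =====
-- Pre_ excludes the empty list, on which Python A recurses forever (RecursionError) and B raises ValueError.
def Pre_all_valid (arr_nums : List Int) (res : Int) : Prop := arr_nums ≠ []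
instance (arr_nums : List Int) (res : Int) : Decidable (Pre_all_valid arr_nums res) := by unfold Pre_all_valid; infer_instance
def pvWitness_all_valid : List Int × Int := ([2, 3, 5], 30)
def Spec_all_valid (arr_nums : List Int) (res : Int) (out : List Int) : Prop := out = all_valid_alt arr_nums res
instance (arr_nums : List Int) (res : Int) (out : List Int) : Decidable (Spec_all_valid arr_nums res out) := by unfold Spec_all_valid; infer_instance

-- ===== CLAIM (what is proved, stated in full; the proofs are below) =====
def Claim_equal_all_valid : Prop := ∀ (arr_nums : List Int) (res : Int), Dom_all_valid arr_nums res → Pre_all_valid arr_nums res → Spec_all_valid arr_nums res (all_valid arr_nums res)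

-- ===== LEMMAS AND PROOFS =====

-- B unfolds one step on a cons with nonempty tail
theorem all_valid_alt_cons (x : Int) (rest : List Int) (res : Int) (h : rest ≠ []) :
    all_valid_alt (x :: rest) res = altStep res (all_valid_alt rest res) x := by
  unfold all_valid_alt
  cases hr : rest.reverse with
  | nil => exact absurd (List.reverse_eq_nil_iff.mp hr) h
  | cons last revinit =>
      have : (x :: rest).reverse = last :: (revinit ++ [x]) := by
        simp [List.reverse_cons, hr]
      simp [this, List.foldl_append]

theorem all_valid_eq_alt (arr_nums : List Int) (res : Int) (h : arr_nums ≠ []) :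
    all_valid arr_nums res = all_valid_alt arr_nums res := by
  induction arr_nums with
  | nil => exact absurd rfl h
  | cons x rest ih =>
      cases rest with
      | nil => simp [all_valid, all_valid_alt]
      | cons y t =>
          rw [all_valid_alt_cons x (y :: t) res (by simp),
              ← ih (by simp)]
          simp [all_valid, altStep]

-- ===== VERDICT (by name: the statement is the Claim_ definition above) =====
theorem all_valid_spec : Claim_equal_all_valid := by
  intro arr_nums res _ hpre
  exact all_valid_eq_alt arr_nums res hpre
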